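-- pv_equiv track=rewrite | github.com/torontoai/TorontoAITeamAgent2 | app/human_ai_collaboration/personalized_agent_adaptation.py | _make_casual
-- ===== SOURCE A (Python) =====
-- def _make_casual(text: str) -> str:
--     """Make text more casual."""
--     # Simplified implementation
--     casual_replacements = {
--         "utilize": "use",
--         "implement": "set up",
--         "facilitate": "help",
--         "regarding": "about",
--         "commence": "start",
--         "additional": "more",
--         "sufficient": "enough"
--     }
--
--     for formal, casual in casual_replacements.items():
--         text = text.replace(formal, casual)
--
--     return text
-- ===== SOURCE B (Python) =====
-- import re
--
-- def _make_casual(text: str) -> str: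
--     """Make text more casual."""
--     casual_replacements = {
--         "utilize": "use",
--         "implement": "set up",
--         "facilitate": "help",
--         "regarding": "about",
--         "commence": "start",
--         "additional": "more",
--         "sufficient": "enough"
--     }
--     pattern = re.compile("|".join(re.escape(k) for k in casual_replacements))
--     return pattern.sub(lambda m: casual_replacements[m.group(0)], text)
-- ===== Notes on version B (the rewrite author's own statement) =====
-- stated objective: idiomatic
-- what changed: The seven sequential full-string str.replace passes are replaced by one compiled-regex alternation over the escaped keys with a dict-dispatch replacer, i.e. a single left-to-right scan of the text.
import Mathlib
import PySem

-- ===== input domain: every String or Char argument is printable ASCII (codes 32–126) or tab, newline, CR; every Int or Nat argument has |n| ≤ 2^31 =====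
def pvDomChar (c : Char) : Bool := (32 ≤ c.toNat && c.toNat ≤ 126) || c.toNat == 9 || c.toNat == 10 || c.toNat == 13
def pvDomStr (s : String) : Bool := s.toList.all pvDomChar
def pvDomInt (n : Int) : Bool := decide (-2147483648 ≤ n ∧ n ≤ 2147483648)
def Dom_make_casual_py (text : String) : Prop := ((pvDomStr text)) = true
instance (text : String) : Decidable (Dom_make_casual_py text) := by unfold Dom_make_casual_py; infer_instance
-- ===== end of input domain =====

-- B replaces A's seven sequential full-string str.replace passes by one left-to-right
-- regex-alternation pass with a dict dispatch (same substring, case-sensitive semantics).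

-- ===== PORT A =====
-- the casual_replacements dict, as an association list in insertion order
def pvCasualPairs : List (String × String) :=
  [("utilize", "use"), ("implement", "set up"), ("facilitate", "help"),
   ("regarding", "about"), ("commence", "start"), ("additional", "more"),
   ("sufficient", "enough")]

-- for formal, casual in casual_replacements.items(): text = text.replace(formal, casual)
def make_casual_py (text : String) : String :=
  pvCasualPairs.foldl (fun t p => PySem.Str.replace t p.1 p.2) text

-- ===== PORT B =====
-- the same dict on the char-list side: the alternatives of the compiled pattern, in dict
-- order, paired with the replacement the dispatch lambda returns for each
def pvAltPairs : List (List Char × List Char) :=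
  [("utilize".toList, "use".toList), ("implement".toList, "set up".toList),
   ("facilitate".toList, "help".toList), ("regarding".toList, "about".toList),
   ("commence".toList, "start".toList), ("additional".toList, "more".toList),
   ("sufficient".toList, "enough".toList)]

-- pattern.sub with an alternation of literal keys: ONE left-to-right scan; at each position
-- the first alternative that matches is replaced (the replacement is not rescanned),
-- otherwise the character is copied
def pvScanSub (ps : List (List Char × List Char)) : List Char → List Char
  | [] => []
  | c :: t =>
    match ps.find? (fun p => p.1.isPrefixOf (c :: t)) with
    | some p => p.2 ++ pvScanSub ps (t.drop (p.1.length - 1))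
    | none => c :: pvScanSub ps t
termination_by l => l.length
decreasing_by all_goals simp [List.length_drop]

def make_casual_py_alt (text : String) : String :=
  String.ofList (pvScanSub pvAltPairs text.toList)

-- ===== PRECONDITION & SPEC =====
def Spec_make_casual_py (text : String) (out : String) : Prop := out = make_casual_py_alt text
instance (text : String) (out : String) : Decidable (Spec_make_casual_py text out) := by unfold Spec_make_casual_py; infer_instance

-- ===== CLAIM (what is proved, stated in full; the proofs are below) =====
def Claim_equal_make_casual_py : Prop := ∀ (text : String), Dom_make_casual_py text → Spec_make_casual_py text (make_casual_py text)

-- ===== LEMMAS AND PROOFS =====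

-- one str.replace pass, as a plain recursion on the char list (k the pattern, v the replacement)
def pvRep (k v : List Char) : List Char → List Char
  | [] => []
  | c :: t =>
    if k.isPrefixOf (c :: t) then v ++ pvRep k v (t.drop (k.length - 1))
    else c :: pvRep k v t
termination_by l => l.length
decreasing_by all_goals simp [List.length_drop]

-- PySem's replace loop computes pvRep (nonempty pattern)
lemma pv_go_eq (k v : List Char) (hk : k ≠ []) :
    ∀ fuel l acc, l.length ≤ fuel →
      PySem.Chars.replace.go k v fuel l acc = acc.reverse ++ pvRep k v l := by
  intro fuel
  induction fuel with
  | zero =>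
    intro l acc hl
    have : l = [] := List.eq_nil_of_length_eq_zero (Nat.le_zero.mp hl)
    subst this
    simp [PySem.Chars.replace.go, pvRep]
  | succ n ih =>
    intro l acc hl
    cases l with
    | nil => simp [PySem.Chars.replace.go, pvRep]
    | cons c t =>
      rw [PySem.Chars.replace.go]
      by_cases hp : k.isPrefixOf (c :: t)
      · obtain ⟨k0, k', hk'⟩ : ∃ k0 k', k = k0 :: k' := by
          cases k with | nil => exact absurd rfl hk | cons a b => exact ⟨a, b, rfl⟩
        simp only [hp, if_true]
        have hd : (c :: t).drop k.length = t.drop (k.length - 1) := by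
          subst hk'; simp
        have hk1 : 1 ≤ k.length := by rw [hk']; simp
        have hlen : ((c :: t).drop k.length).length ≤ n := by
          simp at hl ⊢; omega
        rw [ih _ _ hlen, hd]
        conv_rhs => rw [pvRep]
        simp [hp]
      · simp only [hp, if_false]
        rw [ih t (c :: acc) (by simp at hl; omega)]
        conv_rhs => rw [pvRep]
        simp [hp]

lemma pv_replace_eq (k v s : List Char) (hk : k ≠ []) :
    PySem.Chars.replace s k v = pvRep k v s := by
  have he : k.isEmpty = false := by simpa using hk
  rw [PySem.Chars.replace, he]
  simp only [Bool.false_eq_true, if_false]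
  rw [pv_go_eq k v hk s.length s [] le_rfl]
  simp

-- non-interaction of an earlier pair a with a later pair b:
-- (1) at no position inside b's key does a's key match or overhang;
-- (2) at no position inside a's replacement does b's key match or overhang;
-- (3) no proper suffix of b's key is comparable with a's replacement.
abbrev pvNoTouch (a b : List Char × List Char) : Prop :=
  (∀ p < b.1.length, ¬ a.1 <+: b.1.drop p ∧ ¬ b.1.drop p <+: a.1) ∧
  (∀ p < a.2.length, ¬ b.1 <+: a.2.drop p ∧ ¬ a.2.drop p <+: b.1) ∧
  (∀ q, 1 ≤ q → q < b.1.length → ¬ b.1.drop q <+: a.2 ∧ ¬ a.2 <+: b.1.drop q)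

abbrev pvGood (ps : List (List Char × List Char)) : Prop :=
  (∀ p ∈ ps, p.1 ≠ []) ∧ ps.Pairwise pvNoTouch

-- a pattern that cannot match anywhere inside u passes over it
lemma pvRep_append (k v u x : List Char)
    (h : ∀ p < u.length, ¬ k <+: u.drop p ∧ ¬ u.drop p <+: k) :
    pvRep k v (u ++ x) = u ++ pvRep k v x := by
  induction u with
  | nil => simp
  | cons c u' ih =>
    have h0 := h 0 (by simp)
    simp only [List.drop_zero] at h0
    have hnp : k.isPrefixOf (c :: (u' ++ x)) = false := by
      rw [Bool.eq_false_iff]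
      intro hc
      rw [List.isPrefixOf_iff_prefix] at hc
      have hpre : (c :: u') <+: (c :: (u' ++ x)) := by
        simpa using List.prefix_append (c :: u') x
      rcases List.prefix_or_prefix_of_prefix hc hpre with h1 | h1
      · exact h0.1 h1
      · exact h0.2 h1
    rw [List.cons_append, pvRep, hnp]
    simp only [Bool.false_eq_true, if_false, List.cons_append, List.cons.injEq, true_and]
    exact ih (fun p hp => by simpa using h (p + 1) (by simpa using hp))

lemma pvRep_head (k v x : List Char) (hk : k ≠ []) :
    pvRep k v (k ++ x) = v ++ pvRep k v x := by
  obtain ⟨k0, k', rfl⟩ : ∃ k0 k', k = k0 :: k' := by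
    cases k with | nil => exact absurd rfl hk | cons a b => exact ⟨a, b, rfl⟩
  rw [List.cons_append, pvRep]
  have : (k0 :: k').isPrefixOf (k0 :: (k' ++ x)) = true := by
    rw [List.isPrefixOf_iff_prefix]
    exact ⟨x, by simp⟩
  rw [this]
  simp

lemma pvScanSub_nil (l : List Char) : pvScanSub [] l = l := by
  induction l with
  | nil => rw [pvScanSub]
  | cons c t ih => rw [pvScanSub]; simp [ih]

-- the scan passes over a block u inside which none of its patterns can match
lemma pvScanSub_append (ps : List (List Char × List Char)) (u x : List Char)
    (h : ∀ p < u.length, ∀ a ∈ ps, ¬ a.1 <+: u.drop p ∧ ¬ u.drop p <+: a.1) :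
    pvScanSub ps (u ++ x) = u ++ pvScanSub ps x := by
  induction u with
  | nil => simp
  | cons c u' ih =>
    have hnone : ps.find? (fun p => p.1.isPrefixOf (c :: (u' ++ x))) = none := by
      rw [List.find?_eq_none]
      intro a ha hc
      rw [List.isPrefixOf_iff_prefix] at hc
      have h0 := h 0 (by simp) a ha
      simp only [List.drop_zero] at h0
      have hpre : (c :: u') <+: (c :: (u' ++ x)) := by
        simpa using List.prefix_append (c :: u') x
      rcases List.prefix_or_prefix_of_prefix hc hpre with h1 | h1
      · exact h0.1 h1
      · exact h0.2 h1
    rw [List.cons_append, pvScanSub, hnone,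
      ih (fun p hp a ha => by simpa using h (p + 1) (by simpa using hp) a ha),
      List.cons_append]

-- the scan never creates a fresh occurrence of a proper suffix of a later key at its head
lemma pvScanSub_nopref (ps : List (List Char × List Char)) (k : List Char)
    (hg : ∀ a ∈ ps, ∀ q, 1 ≤ q → q < k.length → ¬ k.drop q <+: a.2 ∧ ¬ a.2 <+: k.drop q) :
    ∀ t q, 1 ≤ q → q < k.length → ¬ k.drop q <+: t → ¬ k.drop q <+: pvScanSub ps t := by
  intro t
  induction t with
  | nil =>
    intro q _ h2 _ hpre
    rw [pvScanSub] at hpre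
    have := List.prefix_nil.mp hpre
    have := congrArg List.length this
    simp [List.length_drop] at this
    omega
  | cons c t' ih =>
    intro q h1 h2 hnt
    rw [pvScanSub]
    cases hf : List.find? (fun p => p.1.isPrefixOf (c :: t')) ps with
    | some a =>
      simp only [hf]
      intro hpre
      have ha := List.mem_of_find?_eq_some hf
      have hga := hg a ha q h1 h2
      rcases List.prefix_or_prefix_of_prefix hpre (List.prefix_append a.2 _) with h3 | h3
      · exact hga.1 h3
      · exact hga.2 h3
    | none =>
      simp only [hf]
      intro hpre
      obtain ⟨d, w, hd⟩ : ∃ d w, k.drop q = d :: w := by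
        cases hq : k.drop q with
        | nil =>
          exfalso
          have := congrArg List.length hq
          simp [List.length_drop] at this
          omega
        | cons d w => exact ⟨d, w, rfl⟩
      rw [hd] at hpre
      have hdc := List.cons_prefix_cons.mp hpre
      have hw : w = k.drop (q + 1) := by
        have h' : (k.drop q).drop 1 = w := by rw [hd]; simp
        rw [← h', List.drop_drop]
      by_cases hq1 : q + 1 < k.length
      · have hwnot : ¬ w <+: t' := fun hc =>
          hnt (by rw [hd, hdc.1]; exact List.cons_prefix_cons.mpr ⟨rfl, hc⟩)
        exact ih (q + 1) (by omega) hq1 (hw ▸ hwnot) (hw ▸ hdc.2)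
      · have hwnil : w = [] := by
          rw [hw]
          apply List.drop_eq_nil_of_le
          omega
        apply hnt
        rw [hd, hwnil, hdc.1]
        exact List.cons_prefix_cons.mpr ⟨rfl, List.nil_prefix⟩

-- one more replace pass after the scan = the scan with one more alternative appended
lemma pv_step (ps : List (List Char × List Char)) (kv : List Char × List Char)
    (hk : kv.1 ≠ []) (hR : ∀ a ∈ ps, pvNoTouch a kv) :
    ∀ l, pvRep kv.1 kv.2 (pvScanSub ps l) = pvScanSub (ps ++ [kv]) l := by
  suffices H : ∀ n l, l.length ≤ n →
      pvRep kv.1 kv.2 (pvScanSub ps l) = pvScanSub (ps ++ [kv]) l by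
    exact fun l => H l.length l le_rfl
  intro n
  induction n with
  | zero =>
    intro l hl
    have : l = [] := List.eq_nil_of_length_eq_zero (Nat.le_zero.mp hl)
    subst this
    rw [pvScanSub, pvScanSub, pvRep]
  | succ n ih =>
    intro l hl
    cases l with
    | nil => rw [pvScanSub, pvScanSub, pvRep]
    | cons c t =>
      cases hf : List.find? (fun p => p.1.isPrefixOf (c :: t)) ps with
      | some a =>
        have ha := List.mem_of_find?_eq_some hf
        have hf2 : List.find? (fun p => p.1.isPrefixOf (c :: t)) (ps ++ [kv]) = some a := by
          rw [List.find?_append, hf]; rfl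
        rw [pvScanSub, pvScanSub, hf, hf2]
        simp only
        rw [pvRep_append kv.1 kv.2 a.2 _ ((hR a ha).2.1)]
        congr 1
        exact ih (t.drop (a.1.length - 1)) (by simp [List.length_drop] at hl ⊢; omega)
      | none =>
        by_cases hm : kv.1 <+: (c :: t)
        · -- the new (last) alternative fires here
          obtain ⟨y, hy⟩ := hm
          obtain ⟨k0, k', hk'⟩ : ∃ k0 k', kv.1 = k0 :: k' := by
            cases h : kv.1 with
            | nil => exact absurd h hk
            | cons a b => exact ⟨a, b, rfl⟩
          have hf2 : List.find? (fun p => p.1.isPrefixOf (c :: t)) (ps ++ [kv]) = some kv := by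
            rw [List.find?_append, hf]
            have hip : kv.1.isPrefixOf (c :: t) = true := by
              rw [List.isPrefixOf_iff_prefix]; exact ⟨y, hy⟩
            simp [hip]
          have hscan : pvScanSub ps (c :: t) = kv.1 ++ pvScanSub ps y := by
            rw [← hy]
            apply pvScanSub_append
            intro p hp a ha
            exact ((hR a ha).1 p hp).imp id id
          have hyt : t.drop (kv.1.length - 1) = y := by
            have h2 : k' ++ y = t := by
              have h3 := hy
              rw [hk'] at h3
              simp at h3
              exact h3.2
            rw [hk', ← h2]
            simp
          conv_rhs => rw [pvScanSub]
          rw [hf2]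
          simp only
          rw [hscan, pvRep_head _ _ _ hk, hyt]
          congr 1
          apply ih
          have : (c :: t).length = kv.1.length + y.length := by rw [← hy]; simp
          simp at hl this
          rw [hk'] at this
          simp at this
          omega
        · -- no alternative fires at this position
          have hf2 : List.find? (fun p => p.1.isPrefixOf (c :: t)) (ps ++ [kv]) = none := by
            rw [List.find?_append, hf]
            simp [List.isPrefixOf_iff_prefix, hm]
          rw [pvScanSub, pvScanSub, hf, hf2]
          simp only
          have hnp : kv.1.isPrefixOf (c :: pvScanSub ps t) = false := by
            rw [Bool.eq_false_iff]
            intro hc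
            rw [List.isPrefixOf_iff_prefix] at hc
            obtain ⟨k0, k', hk'⟩ : ∃ k0 k', kv.1 = k0 :: k' := by
              cases h : kv.1 with
              | nil => exact absurd h hk
              | cons a b => exact ⟨a, b, rfl⟩
            rw [hk'] at hc
            have hdc := List.cons_prefix_cons.mp hc
            cases hk'nil : k' with
            | nil =>
              apply hm
              rw [hk', hdc.1, hk'nil]
              exact List.cons_prefix_cons.mpr ⟨rfl, List.nil_prefix⟩
            | cons e k'' =>
              have hq : k' = kv.1.drop 1 := by rw [hk']; simp
              have hqlt : 1 < kv.1.length := by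
                rw [hk', hk'nil]; simp
              have hknotin : ¬ kv.1.drop 1 <+: t := by
                intro hc2
                apply hm
                rw [hk', hdc.1]
                refine List.cons_prefix_cons.mpr ⟨rfl, ?_⟩
                rw [hq]
                exact hc2
              have := pvScanSub_nopref ps kv.1
                (fun a ha q h1 h2 => (hR a ha).2.2 q h1 h2)
                t 1 le_rfl hqlt hknotin
              apply this
              rw [← hq]
              rw [hk'nil] at hdc ⊢
              exact hdc.2
          rw [pvRep, hnp]
          simp only [Bool.false_eq_true, if_false, List.cons.injEq, true_and]
          exact ih t (by simp at hl; omega)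

-- the chain of replace passes is the single scan (for non-interacting pairs)
lemma pv_chain (ps : List (List Char × List Char)) (h : pvGood ps) :
    ∀ l, ps.foldl (fun acc p => pvRep p.1 p.2 acc) l = pvScanSub ps l := by
  induction ps using List.reverseRecOn with
  | nil => intro l; rw [pvScanSub_nil]; rfl
  | append_singleton ps kv ih =>
    obtain ⟨hne, hpw⟩ := h
    rw [List.pairwise_append] at hpw
    intro l
    rw [List.foldl_append]
    simp only [List.foldl_cons, List.foldl_nil]
    rw [ih ⟨fun p hp => hne p (by simp [hp]), hpw.1⟩ l]
    exact pv_step ps kv (hne kv (by simp)) (fun a ha => hpw.2.2 a ha kv (by simp)) _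

-- A's seven string-level replace passes, moved to the char-list side
lemma pvA_toList (text : String) :
    (make_casual_py text).toList =
      pvAltPairs.foldl (fun acc p => pvRep p.1 p.2 acc) text.toList := by
  simp only [make_casual_py, pvCasualPairs, pvAltPairs, List.foldl_cons, List.foldl_nil,
    PySem.Str.toList_replace]
  rw [pv_replace_eq _ _ _ (by decide), pv_replace_eq _ _ _ (by decide),
    pv_replace_eq _ _ _ (by decide), pv_replace_eq _ _ _ (by decide),
    pv_replace_eq _ _ _ (by decide), pv_replace_eq _ _ _ (by decide),
    pv_replace_eq _ _ _ (by decide)]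

-- ===== VERDICT (by name: the statement is the Claim_ definition above) =====
theorem make_casual_py_spec : Claim_equal_make_casual_py := by
  intro text _
  unfold Spec_make_casual_py make_casual_py_alt
  have h1 := pvA_toList text
  rw [pv_chain pvAltPairs (by decide)] at h1
  calc make_casual_py text = String.ofList (make_casual_py text).toList := by
        rw [String.ofList_toList]
    _ = String.ofList (pvScanSub pvAltPairs text.toList) := by rw [h1]
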